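-- pv_equiv track=rewrite | github.com/ivansg44/AMR-TV | amr_tv/node_link_diagram/utils.py | get_node_color_map
-- ===== SOURCE A (Python) =====
-- def get_node_color_map(selected_events):
--     """Generate color map for all organism groups in selected_events.
--
--     This is done dynamically for each node-link diagram, because it
--     minimizes collisions.
--
--     :param selected_events: Specified organism_group-organism_group
--     relationships inside nested dictionary.
--     :type selected_events: dict[str, dict[str, None]]
--     :return: organism_group and their assigned hex codes.
--     :rtype: dict[str, str]
--     """
--     # https://colorbrewer2.org/?type=qualitative&scheme=Set1&n=9
--     colour_scheme = [
--         "#e41a1c", "#377eb8", "#4daf4a", "#984ea3", "#ff7f00", "#ffff33",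
--         "#a65628", "#f781bf", "#999999"
--     ]
--
--     acc = 0
--     color_map = {}
--     for organism_group in selected_events:
--         if len(selected_events[organism_group]):
--             color_map[organism_group] = colour_scheme[acc % len(colour_scheme)]
--             acc += 1
--
--     return color_map
-- ===== SOURCE B (Python) =====
-- def get_node_color_map(selected_events):
--     """Generate color map for all organism groups in selected_events."""
--     colour_scheme = [
--         "#e41a1c", "#377eb8", "#4daf4a", "#984ea3", "#ff7f00", "#ffff33",
--         "#a65628", "#f781bf", "#999999"
--     ]
--
--     kept = [g for g in selected_events if selected_events[g]]
--
--     def chunk_pairs(groups):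
--         # split the kept groups into palette-sized blocks; each block is
--         # paired elementwise against the whole palette
--         if not groups:
--             return []
--         n = len(colour_scheme)
--         return list(zip(groups[:n], colour_scheme)) + chunk_pairs(groups[n:])
--
--     return dict(chunk_pairs(kept))
-- ===== Notes on version B (the rewrite author's own statement) =====
-- stated objective: alternative
-- what changed: Replaces A's single accumulating loop (counter + per-element modulo indexing into the palette) by staged passes: a filtering pass collecting the nonempty groups, then a recursive block decomposition that splits the kept groups into palette-sized chunks and zips each whole chunk against the full palette, assembled with dict(); Pre_ only excludes association lists with duplicate group keys, which do not encode any Python dict argument.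
import Mathlib
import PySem

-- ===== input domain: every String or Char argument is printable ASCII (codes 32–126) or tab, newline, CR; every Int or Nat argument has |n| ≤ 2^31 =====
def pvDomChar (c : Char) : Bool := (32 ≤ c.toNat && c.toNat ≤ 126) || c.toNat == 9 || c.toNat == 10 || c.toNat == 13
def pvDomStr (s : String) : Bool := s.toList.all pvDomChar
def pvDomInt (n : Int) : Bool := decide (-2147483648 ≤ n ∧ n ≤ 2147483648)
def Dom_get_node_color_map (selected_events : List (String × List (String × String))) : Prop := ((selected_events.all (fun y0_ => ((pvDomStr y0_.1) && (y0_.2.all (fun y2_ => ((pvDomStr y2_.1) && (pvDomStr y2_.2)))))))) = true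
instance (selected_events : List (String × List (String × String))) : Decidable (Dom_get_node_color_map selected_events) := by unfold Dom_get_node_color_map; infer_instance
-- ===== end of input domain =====

-- B is an alternative decomposition: a filtering pass collects the nonempty groups, then a
-- recursive block decomposition zips palette-sized chunks of them against the full palette.

-- ===== PORT A =====
-- A iterates over the dict's keys and looks each value up; on a dict that is exactly
-- iterating its (key, value) items, which is how the fold reads the pairs here.
def get_node_color_map (selected_events : List (String × List (String × String))) : List (String × String) :=
  let colour_scheme : List String :=
    ["#e41a1c", "#377eb8", "#4daf4a", "#984ea3", "#ff7f00", "#ffff33",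
     "#a65628", "#f781bf", "#999999"]
  (selected_events.foldl
    (fun (st : Nat × PySem.Dict String String) kv =>
      if kv.2.length ≠ 0 then
        (st.1 + 1,
         st.2.insert kv.1 (colour_scheme.getD (st.1 % colour_scheme.length) ""))
      else st)
    (0, PySem.Dict.empty)).2.items

-- ===== PORT B =====
def pvPalette : List String :=
  ["#e41a1c", "#377eb8", "#4daf4a", "#984ea3", "#ff7f00", "#ffff33",
   "#a65628", "#f781bf", "#999999"]

-- port of chunk_pairs: slice a palette-sized block off the front, zip it against the
-- whole palette, recurse on the rest
def pvChunkPairs : List String → List (String × String)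
  | [] => []
  | g :: gs =>
      ((g :: gs).take pvPalette.length).zip pvPalette
        ++ pvChunkPairs ((g :: gs).drop pvPalette.length)
termination_by gs => gs.length
decreasing_by simp [pvPalette]

def get_node_color_map_alt (selected_events : List (String × List (String × String))) : List (String × String) :=
  let kept := (selected_events.filter (fun kv => !kv.2.isEmpty)).map Prod.fst
  (PySem.Dict.ofList (pvChunkPairs kept)).items

-- ===== PRECONDITION & SPEC =====
-- Pre_ excludes association lists with duplicate group keys: the Python argument is a
-- dict, which a duplicate-key list does not encode (reading it as a dict collapses the
-- duplicates), so those lists correspond to no actual Python input.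
def Pre_get_node_color_map (selected_events : List (String × List (String × String))) : Prop :=
  (selected_events.map Prod.fst).Nodup
instance (selected_events : List (String × List (String × String))) : Decidable (Pre_get_node_color_map selected_events) := by unfold Pre_get_node_color_map; infer_instance

def pvWitness_get_node_color_map : (List (String × List (String × String))) :=
  [("a", [("x", "y")]), ("b", []), ("c", [("u", "v")])]

def Spec_get_node_color_map (selected_events : List (String × List (String × String))) (out : List (String × String)) : Prop := out = get_node_color_map_alt selected_events
instance (selected_events : List (String × List (String × String))) (out : List (String × String)) : Decidable (Spec_get_node_color_map selected_events out) := by unfold Spec_get_node_color_map; infer_instance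

-- ===== CLAIM (what is proved, stated in full; the proofs are below) =====
def Claim_equal_get_node_color_map : Prop := ∀ (selected_events : List (String × List (String × String))), Dom_get_node_color_map selected_events → Pre_get_node_color_map selected_events → Spec_get_node_color_map selected_events (get_node_color_map selected_events)

-- ===== LEMMAS AND PROOFS =====

-- proof-only helper: the group list zipped against the colour cycle, resumed at `rem`
def pvCycleZip (orig : List String) : List String → List String → List (String × String)
  | _, [] => []
  | c :: rest, g :: gs => (g, c) :: pvCycleZip orig rest gs
  | [], g :: gs =>
      match orig with
      | c :: rest => (g, c) :: pvCycleZip orig rest gs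
      | [] => []

-- cycling from an exhausted tail is the same as restarting from the full list
lemma pvCycleZip_nil_eq (orig : List String) (h : orig ≠ []) (gs : List String) :
    pvCycleZip orig [] gs = pvCycleZip orig orig gs := by
  cases gs with
  | nil => cases orig with | nil => rfl | cons c rest => rfl
  | cons g gs =>
      cases orig with
      | nil => exact absurd rfl h
      | cons c rest => rfl

lemma pvCycleZip_map_fst (orig : List String) (h : orig ≠ []) :
    ∀ (gs rem : List String), (pvCycleZip orig rem gs).map Prod.fst = gs := by
  intro gs
  induction gs with
  | nil => intro rem; cases rem <;> rfl
  | cons g gs ih =>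
      intro rem
      cases rem with
      | cons c rest => simp [pvCycleZip, ih]
      | nil =>
          cases horig : orig with
          | nil => exact absurd horig h
          | cons c rest =>
              simp only [pvCycleZip]
              simp [← horig, ih]

-- one cycle step eaten blockwise: zip the front block against the remaining colours,
-- then restart the cycle on the rest
lemma pvCycleZip_block (orig : List String) (h : orig ≠ []) :
    ∀ (gs rem : List String), rem ≠ [] →
      pvCycleZip orig rem gs
        = (gs.take rem.length).zip rem ++ pvCycleZip orig orig (gs.drop rem.length) := by
  intro gs
  induction gs with
  | nil =>
      intro rem _
      cases rem <;> cases orig <;> simp [pvCycleZip]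
  | cons g gs ih =>
      intro rem hrem
      cases rem with
      | nil => exact absurd rfl hrem
      | cons c rest =>
          simp only [pvCycleZip, List.length_cons, List.take_succ_cons,
            List.zip_cons_cons, List.drop_succ_cons, List.cons_append]
          cases hrest : rest with
          | nil =>
              simp [pvCycleZip_nil_eq orig h]
          | cons c' rest' =>
              rw [ih (c' :: rest') (by simp)]

-- the chunked pairing is exactly the cycle pairing
lemma pvChunkPairs_eq_cycleZip :
    ∀ gs : List String, pvChunkPairs gs = pvCycleZip pvPalette pvPalette gs := by
  intro gs
  induction gs using pvChunkPairs.induct with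
  | case1 => cases h : pvPalette <;> simp [pvChunkPairs, pvCycleZip]
  | case2 g gs ih =>
      rw [pvChunkPairs, ih,
        pvCycleZip_block pvPalette (by simp [pvPalette]) (g :: gs) pvPalette
          (by simp [pvPalette])]

-- A's accumulating loop, started at counter acc over a fresh-keyed dict, appends exactly
-- the kept keys zipped against the colour cycle resumed at position acc % length.
lemma loopA_items (cs : List String) (hcs : cs ≠ []) :
    ∀ (se : List (String × List (String × String))) (acc : Nat)
      (d : PySem.Dict String String),
      (∀ kv ∈ se, d.contains kv.1 = false) →
      (se.map Prod.fst).Nodup →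
      ((se.foldl
          (fun (st : Nat × PySem.Dict String String) kv =>
            if kv.2.length ≠ 0 then
              (st.1 + 1, st.2.insert kv.1 (cs.getD (st.1 % cs.length) ""))
            else st)
          (acc, d)).2).items
        = d.items ++ pvCycleZip cs (cs.drop (acc % cs.length))
            ((se.filter (fun kv => !kv.2.isEmpty)).map Prod.fst) := by
  intro se
  induction se with
  | nil =>
      intro acc d _ _
      cases h : cs.drop (acc % cs.length) <;> simp [pvCycleZip]
  | cons kv rest ih =>
      intro acc d hfresh hnd
      by_cases hk : kv.2.length ≠ 0
      · have hkv2 : kv.2 ≠ [] := fun h => hk (by simp [h])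
        have hlt : acc % cs.length < cs.length :=
          Nat.mod_lt _ (List.length_pos_iff.mpr hcs)
        have hget : cs.getD (acc % cs.length) "" = cs[acc % cs.length] := by
          simp [List.getD, List.getElem?_eq_getElem hlt]
        have hdrop : cs.drop (acc % cs.length)
            = cs[acc % cs.length] :: cs.drop (acc % cs.length + 1) :=
          List.drop_eq_getElem_cons hlt
        have hfresh' : ∀ p ∈ rest,
            (d.insert kv.1 (cs.getD (acc % cs.length) "")).contains p.1 = false := by
          intro p hp
          rw [PySem.Dict.contains_insert]
          have hne : p.1 ≠ kv.1 := by
            have := hnd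
            simp only [List.map_cons, List.nodup_cons] at this
            intro h; exact this.1 (h ▸ List.mem_map_of_mem hp)
          simp [hne, hfresh p (List.mem_cons_of_mem _ hp)]
        have hnd' : (rest.map Prod.fst).Nodup := by
          simp only [List.map_cons, List.nodup_cons] at hnd; exact hnd.2
        have hins : (d.insert kv.1 (cs.getD (acc % cs.length) "")).items
            = d.items ++ [(kv.1, cs.getD (acc % cs.length) "")] :=
          PySem.Dict.items_insert_of_not_contains d _ (hfresh kv List.mem_cons_self)
        have step := ih (acc + 1) (d.insert kv.1 (cs.getD (acc % cs.length) ""))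
          hfresh' hnd'
        have hfilter : ((kv :: rest).filter (fun kv => !kv.2.isEmpty)).map Prod.fst
            = kv.1 :: (rest.filter (fun kv => !kv.2.isEmpty)).map Prod.fst := by
          simp [hkv2]
        simp only [List.foldl_cons, if_pos hk]
        rw [step, hins, hfilter, hdrop]
        simp only [hget, List.append_assoc, List.singleton_append, pvCycleZip]
        have hmod : (acc + 1) % cs.length = (acc % cs.length + 1) % cs.length :=
          (Nat.mod_add_mod acc cs.length 1).symm
        rcases Nat.lt_or_ge (acc % cs.length + 1) cs.length with hlt1 | hge
        · rw [hmod, Nat.mod_eq_of_lt hlt1]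
        · have heq : acc % cs.length + 1 = cs.length := by omega
          have h1 : (acc + 1) % cs.length = 0 := by
            rw [hmod, heq, Nat.mod_self]
          rw [h1, heq, List.drop_length, List.drop_zero,
            pvCycleZip_nil_eq cs hcs]
      · have hkv2 : kv.2 = [] := List.length_eq_zero_iff.mp (not_ne_iff.mp hk)
        have step := ih acc d (fun p hp => hfresh p (List.mem_cons_of_mem _ hp))
          (by simp only [List.map_cons, List.nodup_cons] at hnd; exact hnd.2)
        simp only [List.foldl_cons, if_neg hk]
        rw [step]
        simp [hkv2]

-- dict(chunk_pairs(...)) over distinct keys keeps exactly the listed pairs in order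
lemma ofList_items_of_nodup (l : List (String × String)) (h : (l.map Prod.fst).Nodup) :
    (PySem.Dict.ofList l).items = l := by
  have : PySem.Dict.ofList l
      = l.foldl (fun d p => d.insert p.1 p.2) PySem.Dict.empty := rfl
  rw [this]
  have := PySem.Dict.items_foldl_insert_fresh (l := l) (k := Prod.fst) (v := Prod.snd)
    (d := PySem.Dict.empty) (by intro a _; simp [PySem.Dict.contains_empty]) h
  simpa using this

-- ===== VERDICT (by name: the statement is the Claim_ definition above) =====
theorem get_node_color_map_spec : Claim_equal_get_node_color_map := by
  intro se _ hpre
  unfold Spec_get_node_color_map get_node_color_map get_node_color_map_alt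
  have hcs : pvPalette ≠ [] := by simp [pvPalette]
  have hkeptnd : (((se.filter (fun kv => !kv.2.isEmpty)).map Prod.fst)).Nodup :=
    List.Nodup.sublist (List.filter_sublist.map Prod.fst) hpre
  have hzip := pvCycleZip_map_fst pvPalette hcs
    ((se.filter (fun kv => !kv.2.isEmpty)).map Prod.fst) pvPalette
  simp only [pvChunkPairs_eq_cycleZip,
    ofList_items_of_nodup _ (by rw [hzip]; exact hkeptnd)]
  have := loopA_items pvPalette hcs se 0 PySem.Dict.empty
    (by intro kv _; simp [PySem.Dict.contains_empty]) hpre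
  simpa [pvPalette] using this
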